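-- pv_equiv track=rewrite | github.com/danino18/ee_planer | files/build_degree_dataset_v5.py | infer_track_from_pages
-- ===== SOURCE A (Python) =====
-- from typing import Any, Dict, List, Optional, Tuple
--
-- def infer_track_from_pages(track_ranges: Dict[str, Tuple[int, int]], pages: List[int]) -> Optional[str]:
--     if not pages:
--         return None
--     best = None
--     best_overlap = -1
--     page_set = set(pages)
--     for track, (start, end) in track_ranges.items():
--         overlap = len(page_set & set(range(start, end + 1)))
--         if overlap > best_overlap:
--             best_overlap = overlap
--             best = track
--     return best
-- ===== SOURCE B (Python) =====
-- from typing import Dict, List, Optional, Tuple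
--
--
-- def infer_track_from_pages(track_ranges: Dict[str, Tuple[int, int]], pages: List[int]) -> Optional[str]:
--     if not pages:
--         return None
--     sp = sorted(set(pages))
--
--     def lb(x):
--         # first index i with sp[i] >= x (hand-written lower bound)
--         lo, hi = 0, len(sp)
--         while lo < hi:
--             mid = (lo + hi) // 2
--             if sp[mid] < x:
--                 lo = mid + 1
--             else:
--                 hi = mid
--         return lo
--
--     best = None
--     best_overlap = -1
--     for track, (start, end) in track_ranges.items():
--         overlap = max(lb(end + 1) - lb(start), 0)
--         if overlap > best_overlap:
--             best_overlap = overlap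
--             best = track
--     return best
-- ===== Notes on version B (the rewrite author's own statement) =====
-- stated objective: alternative
-- what changed: Instead of materialising set(range(start, end+1)) and intersecting it with the page set per track, B sorts the unique pages once and computes each track's overlap as a difference of two hand-written binary-search lower bounds; it trades A's dependence on the range width for a log-factor search over the sorted pages.
import Mathlib
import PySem

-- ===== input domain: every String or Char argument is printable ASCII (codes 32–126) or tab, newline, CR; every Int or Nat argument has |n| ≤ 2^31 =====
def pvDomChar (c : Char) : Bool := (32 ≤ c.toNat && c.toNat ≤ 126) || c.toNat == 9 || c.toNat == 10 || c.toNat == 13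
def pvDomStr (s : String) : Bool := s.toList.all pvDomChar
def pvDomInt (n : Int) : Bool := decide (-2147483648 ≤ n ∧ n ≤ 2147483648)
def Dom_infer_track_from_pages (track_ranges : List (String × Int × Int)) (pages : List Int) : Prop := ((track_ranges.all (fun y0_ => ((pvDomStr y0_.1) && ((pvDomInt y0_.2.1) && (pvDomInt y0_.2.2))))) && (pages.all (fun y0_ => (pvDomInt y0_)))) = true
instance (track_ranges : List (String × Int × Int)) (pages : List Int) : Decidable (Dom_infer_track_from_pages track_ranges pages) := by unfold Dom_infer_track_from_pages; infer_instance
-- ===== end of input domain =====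

-- B replaces A's per-track range materialisation + set intersection by one sort of the
-- unique pages and two binary-search lower bounds per track (an alternative algorithm, same measured cost).


-- ===== PORT A =====
-- The dict argument is modelled as PySem.Dict.ofList of the association list (Python's dict(...)).
-- 'len(page_set & set(range(start, end + 1)))' is Set.len of Set.inter (only the length is used).
def infer_track_from_pages (track_ranges : List (String × Int × Int)) (pages : List Int) : Option String :=
  if pages = [] then none
  else
    let page_set := PySem.Set.ofList pages
    let st := (PySem.Dict.ofList track_ranges).items.foldl
      (fun (st : Option String × Int) tr =>
        let overlap : Int :=
          PySem.Set.len (PySem.Set.inter page_set (PySem.Set.ofList (PySem.List.pyRange tr.2.1 (tr.2.2 + 1))))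
        if overlap > st.2 then (some tr.1, overlap) else st)
      (none, -1)
    st.1

-- ===== PORT B =====
-- Source B's hand-written lower-bound while-loop; lo, hi stay in [0, len sp] in Python, so they are Nat
-- (mid = (lo+hi)//2 agrees with Nat division on nonnegatives) and sp[mid] is always in range (mid < hi ≤ len sp),
-- so 'sp.getD mid 0' is exactly Python's sp[mid] here.
def lbAux (sp : List Int) (x : Int) (lo hi : Nat) : Nat :=
  if _h : lo < hi then
    let mid := (lo + hi) / 2
    if sp.getD mid 0 < x then lbAux sp x (mid + 1) hi else lbAux sp x lo mid
  else lo
termination_by hi - lo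
decreasing_by all_goals omega

def infer_track_from_pages_alt (track_ranges : List (String × Int × Int)) (pages : List Int) : Option String :=
  if pages = [] then none
  else
    let sp := PySem.List.sorted (PySem.Set.ofList pages) (fun x => x)
    let lb := fun (x : Int) => lbAux sp x 0 sp.length
    let st := (PySem.Dict.ofList track_ranges).items.foldl
      (fun (st : Option String × Int) tr =>
        let overlap : Int := max ((lb (tr.2.2 + 1) : Int) - (lb tr.2.1 : Int)) 0
        if overlap > st.2 then (some tr.1, overlap) else st)
      (none, -1)
    st.1

-- ===== PRECONDITION & SPEC =====
def Spec_infer_track_from_pages (track_ranges : List (String × Int × Int)) (pages : List Int) (out : Option String) : Prop := out = infer_track_from_pages_alt track_ranges pages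
instance (track_ranges : List (String × Int × Int)) (pages : List Int) (out : Option String) : Decidable (Spec_infer_track_from_pages track_ranges pages out) := by unfold Spec_infer_track_from_pages; infer_instance

-- ===== CLAIM (what is proved, stated in full; the proofs are below) =====
def Claim_equal_infer_track_from_pages : Prop := ∀ (track_ranges : List (String × Int × Int)) (pages : List Int), Dom_infer_track_from_pages track_ranges pages → Spec_infer_track_from_pages track_ranges pages (infer_track_from_pages track_ranges pages)

-- ===== LEMMAS AND PROOFS =====

-- if the positions satisfying p are exactly the first k, then countP p = k
theorem countP_eq_of_iff_lt (p : Int → Bool) (l : List Int) (k : Nat) (hk : k ≤ l.length)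
    (h : ∀ i (hi : i < l.length), p l[i] = true ↔ i < k) : l.countP p = k := by
  induction l generalizing k with
  | nil => simp at hk ⊢; omega
  | cons a t ih =>
    cases k with
    | zero =>
      have ha : p a = false := by
        have := h 0 (by simp)
        simp at this; simpa using this
      have ht : t.countP p = 0 := by
        apply ih 0 (by omega)
        intro i hi
        have := h (i + 1) (by simp; omega)
        simpa using this
      simp [List.countP_cons, ha, ht]
    | succ k' =>
      have ha : p a = true := by
        have := h 0 (by simp)
        simpa using this.2 (by omega)
      have ht : t.countP p = k' := by
        apply ih k' (by simpa using hk)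
        intro i hi
        have := h (i + 1) (by simp; omega)
        simpa [Nat.succ_lt_succ_iff] using this
      simp [List.countP_cons, ha, ht]

-- correctness of the hand-written lower bound on a ≤-sorted list
theorem lbAux_eq (sp : List Int) (x : Int) (hs : sp.Pairwise (· ≤ ·)) :
    ∀ n lo hi, hi - lo ≤ n → hi ≤ sp.length → lo ≤ hi →
    (∀ i (hi' : i < sp.length), i < lo → sp[i] < x) →
    (∀ i (hi' : i < sp.length), hi ≤ i → ¬ sp[i] < x) →
    lbAux sp x lo hi = sp.countP (fun y => decide (y < x)) := by
  have mono : ∀ i j (hi : i < sp.length) (hj : j < sp.length), i ≤ j → sp[i] ≤ sp[j] := by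
    intro i j hi hj hij
    rcases Nat.lt_or_ge i j with h | h
    · exact (List.pairwise_iff_getElem.mp hs) i j hi hj h
    · have : i = j := by omega
      subst this; rfl
  intro n
  induction n with
  | zero =>
    intro lo hi hn hhi hlh h1 h2
    have hnl : ¬ lo < hi := by omega
    rw [lbAux, dif_neg hnl]
    refine (countP_eq_of_iff_lt _ sp lo (by omega) ?_).symm
    intro i hi'
    constructor
    · intro hp
      by_contra hge
      exact h2 i hi' (by omega) (by simpa using hp)
    · intro hlt; simpa using h1 i hi' hlt
  | succ n ih =>
    intro lo hi hn hhi hlh h1 h2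
    by_cases hcond : lo < hi
    · rw [lbAux, dif_pos hcond]
      show (if sp.getD ((lo + hi) / 2) 0 < x then lbAux sp x ((lo + hi) / 2 + 1) hi
            else lbAux sp x lo ((lo + hi) / 2)) = sp.countP (fun y => decide (y < x))
      have hmid : (lo + hi) / 2 < sp.length := by omega
      rw [List.getD_eq_getElem sp 0 hmid]
      by_cases hcmp : sp[(lo + hi) / 2] < x
      · rw [if_pos hcmp]
        refine ih ((lo + hi) / 2 + 1) hi (by omega) hhi (by omega) ?_ h2
        intro i hi' hilt
        exact lt_of_le_of_lt (mono i ((lo + hi) / 2) hi' hmid (by omega)) hcmp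
      · rw [if_neg hcmp]
        refine ih lo ((lo + hi) / 2) (by omega) (by omega) (by omega) h1 ?_
        intro i hi' hge hlt
        exact hcmp (lt_of_le_of_lt (mono ((lo + hi) / 2) i hmid hi' hge) hlt)
    · rw [lbAux, dif_neg hcond]
      refine (countP_eq_of_iff_lt _ sp lo (by omega) ?_).symm
      intro i hi'
      constructor
      · intro hp
        by_contra hge
        exact h2 i hi' (by omega) (by simpa using hp)
      · intro hlt; simpa using h1 i hi' hlt

-- counting split: for s ≤ e+1, count(<e+1) = count(<s) + count(s ≤ · < e+1)
theorem countP_split (L : List Int) (s e : Int) (h : s ≤ e + 1) :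
    L.countP (fun y => decide (y < e + 1)) =
      L.countP (fun y => decide (y < s)) + L.countP (fun y => decide (s ≤ y ∧ y < e + 1)) := by
  induction L with
  | nil => simp
  | cons a t ih =>
    simp only [List.countP_cons, ih, decide_eq_true_eq]
    split_ifs <;> omega

-- the per-track overlap computed by A equals the one computed by B
theorem overlap_eq (pages : List Int) (s e : Int) :
    PySem.Set.len (PySem.Set.inter (PySem.Set.ofList pages)
        (PySem.Set.ofList (PySem.List.pyRange s (e + 1)))) =
    max ((lbAux (PySem.List.sorted (PySem.Set.ofList pages) (fun x => x)) (e + 1) 0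
            (PySem.List.sorted (PySem.Set.ofList pages) (fun x => x)).length : Int) -
         (lbAux (PySem.List.sorted (PySem.Set.ofList pages) (fun x => x)) s 0
            (PySem.List.sorted (PySem.Set.ofList pages) (fun x => x)).length : Int)) 0 := by
  set P : List Int := PySem.Set.ofList pages with hP
  set sp : List Int := PySem.List.sorted P (fun x => x) with hsp
  have hs : sp.Pairwise (· ≤ ·) := PySem.List.sorted_pairwise P (fun x => x)
  have hperm : sp.Perm P := PySem.List.sorted_perm P (fun x => x) false
  have hlb : ∀ x : Int, lbAux sp x 0 sp.length = P.countP (fun y => decide (y < x)) := by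
    intro x
    rw [lbAux_eq sp x hs sp.length 0 sp.length (by omega) (le_refl _) (by omega)
        (fun i hi' hlt => absurd hlt (by omega))
        (fun i hi' hge => absurd hi' (by omega))]
    exact hperm.countP_eq _
  -- left side: count of distinct pages inside [s, e]
  have hL : PySem.Set.len (PySem.Set.inter P (PySem.Set.ofList (PySem.List.pyRange s (e + 1)))) =
      (P.countP (fun y => decide (s ≤ y ∧ y < e + 1)) : Int) := by
    simp only [PySem.Set.len, PySem.Set.inter, List.countP_eq_length_filter]
    congr 1
    refine congrArg List.length (List.filter_congr ?_)
    intro y _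
    simp [PySem.Set.contains, PySem.Set.mem_ofList, PySem.List.mem_pyRange_one]
  rw [hL, hlb, hlb]
  by_cases hse : s ≤ e + 1
  · rw [countP_split P s e hse]
    push_cast
    omega
  · have h0 : P.countP (fun y => decide (s ≤ y ∧ y < e + 1)) = 0 := by
      apply List.countP_eq_zero.mpr
      intro y _; simp; omega
    have hle : P.countP (fun y => decide (y < e + 1)) ≤ P.countP (fun y => decide (y < s)) := by
      apply List.countP_mono_left
      intro y _ hy; simp at hy ⊢; omega
    rw [h0]
    omega

-- ===== VERDICT (by name: the statement is the Claim_ definition above) =====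
theorem infer_track_from_pages_spec : Claim_equal_infer_track_from_pages := by
  intro track_ranges pages _
  unfold Spec_infer_track_from_pages infer_track_from_pages infer_track_from_pages_alt
  by_cases hp : pages = []
  · simp [hp]
  · simp only [if_neg hp]
    congr 1
    apply PySem.List.foldl_congr_mem
    intro acc tr _
    rw [overlap_eq pages tr.2.1 tr.2.2]
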